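-- pv_equiv track=rewrite | github.com/fjiangAI/CAIL2021 | cg_t5_full/DS/data_set_joint.py | find_longest_du
-- ===== SOURCE A (Python) =====
-- def find_longest_du(dus):
--     max_length = 0
--     max_index = -1
--     all_length = 0
--     for index, du in enumerate(dus):
--         all_length += len(du)
--         if len(du) > max_length:
--             max_length = len(du)
--             max_index = index
--     return max_index, all_length
-- ===== SOURCE B (Python) =====
-- def find_longest_du(dus):
--     lengths = [len(du) for du in dus]
--     all_length = sum(lengths)
--     m = max(lengths) if lengths else 0
--     max_index = lengths.index(m) if m > 0 else -1
--     return max_index, all_length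
-- ===== Notes on version B (the rewrite author's own statement) =====
-- stated objective: simpler
-- what changed: Replaces the single indexed loop maintaining three running variables with a lengths list followed by stdlib sum/max/index calls.
import Mathlib
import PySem

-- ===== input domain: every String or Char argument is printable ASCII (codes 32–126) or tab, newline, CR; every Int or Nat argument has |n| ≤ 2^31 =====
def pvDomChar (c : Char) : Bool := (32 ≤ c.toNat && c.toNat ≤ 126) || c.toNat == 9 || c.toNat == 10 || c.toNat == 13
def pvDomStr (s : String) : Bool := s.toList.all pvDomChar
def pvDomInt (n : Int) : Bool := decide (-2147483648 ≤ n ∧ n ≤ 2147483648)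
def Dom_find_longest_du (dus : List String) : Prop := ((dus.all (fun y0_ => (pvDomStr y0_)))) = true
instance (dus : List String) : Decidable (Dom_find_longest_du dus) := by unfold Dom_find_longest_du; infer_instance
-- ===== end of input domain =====

-- B computes the same (first-max index, total length) via sum/max/first-index over the lengths list instead of one indexed loop with running state; same O(n) cost, simpler decomposition.


-- ===== PORT A =====
def find_longest_du (dus : List String) : Int × Int :=
  let r := (PySem.List.enumerate dus).foldl
    (fun (st : Int × Int × Int) (p : Int × String) =>
      let all_length := st.2.2 + PySem.Str.len p.2
      if PySem.Str.len p.2 > st.1 then (PySem.Str.len p.2, p.1, all_length)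
      else (st.1, st.2.1, all_length))
    (0, -1, 0)
  (r.2.1, r.2.2)

-- ===== PORT B =====
def find_longest_du_alt (dus : List String) : Int × Int :=
  let lengths := dus.map PySem.Str.len
  let all_length := lengths.foldl (· + ·) 0
  -- max(lengths) if lengths else 0
  let m : Int := if lengths.isEmpty then 0 else (PySem.List.max? lengths (fun y => y)).getD 0
  -- lengths.index(m) if m > 0 else -1  (when m > 0, m is the max so it occurs in lengths
  -- and index? is some; the getD default is never used)
  let max_index : Int := if 0 < m then ((PySem.List.index? lengths m).getD 0 : Nat) else -1
  (max_index, all_length)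

-- ===== PRECONDITION & SPEC =====
def Spec_find_longest_du (dus : List String) (out : Int × Int) : Prop := out = find_longest_du_alt dus
instance (dus : List String) (out : Int × Int) : Decidable (Spec_find_longest_du dus out) := by unfold Spec_find_longest_du; infer_instance

-- ===== CLAIM (what is proved, stated in full; the proofs are below) =====
def Claim_equal_find_longest_du : Prop := ∀ (dus : List String), Dom_find_longest_du dus → Spec_find_longest_du dus (find_longest_du dus)


-- ===== LEMMAS AND PROOFS =====

theorem foldl_add_shift (ls : List Int) : ∀ (a b : Int), ls.foldl (· + ·) (a + b) = a + ls.foldl (· + ·) b := by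
  induction ls with
  | nil => intro a b; rfl
  | cons x t ih =>
    intro a b
    simp only [List.foldl_cons]
    rw [add_assoc, ih a (b + x)]

theorem index?_getD_eq_idxOf (xs : List Int) (v : Int) (h : v ∈ xs) :
    (PySem.List.index? xs v).getD 0 = xs.idxOf v := by
  induction xs with
  | nil => cases h
  | cons x t ih =>
    by_cases hx : x = v
    · subst hx
      rw [PySem.List.index?_cons_self]
      simp
    · rw [PySem.List.index?_cons_of_ne t hx]
      have hv : v ∈ t := by
        rcases List.mem_cons.mp h with h1 | h1
        · exact absurd h1.symm hx
        · exact h1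
      obtain ⟨k, hk⟩ := Option.isSome_iff_exists.mp ((PySem.List.index?_isSome_iff t v).mpr hv)
      have hik := ih hv
      rw [hk] at hik ⊢
      simp only [Option.map_some, Option.getD_some] at hik ⊢
      rw [List.idxOf_cons_ne t hx]
      omega

-- Characterisation of A's loop for an arbitrary start index and start state.
theorem loopA_eq (dus : List String) : ∀ (s ml mi al : Int),
    (PySem.List.enumerate dus s).foldl
      (fun (st : Int × Int × Int) (p : Int × String) =>
        let all_length := st.2.2 + PySem.Str.len p.2
        if PySem.Str.len p.2 > st.1 then (PySem.Str.len p.2, p.1, all_length)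
        else (st.1, st.2.1, all_length))
      (ml, mi, al)
    = ((dus.map PySem.Str.len).foldl max ml,
       (if ml < (dus.map PySem.Str.len).foldl max ml
        then s + (((dus.map PySem.Str.len).idxOf ((dus.map PySem.Str.len).foldl max ml) : Nat) : Int)
        else mi),
       al + (dus.map PySem.Str.len).foldl (· + ·) 0) := by
  induction dus with
  | nil =>
    intro s ml mi al
    simp [PySem.List.enumerate_nil]
  | cons x t ih =>
    intro s ml mi al
    simp only [PySem.List.enumerate_cons, List.map_cons, List.foldl_cons]

    by_cases h : PySem.Str.len x > ml
    · rw [if_pos h, ih (s + 1) (PySem.Str.len x) s (al + PySem.Str.len x)]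
      have hxM := (PySem.List.le_foldl_max (t.map PySem.Str.len) (PySem.Str.len x)).1
      rw [max_eq_right (le_of_lt h)]
      simp only [Prod.mk.injEq]
      refine ⟨trivial, ?_, ?_⟩
      · rw [if_pos (lt_of_lt_of_le h hxM)]
        by_cases hlM : PySem.Str.len x < (t.map PySem.Str.len).foldl max (PySem.Str.len x)
        · rw [if_pos hlM, List.idxOf_cons_ne _ (ne_of_lt hlM)]
          push_cast
          ring
        · rw [if_neg hlM]
          have hM : (t.map PySem.Str.len).foldl max (PySem.Str.len x) = PySem.Str.len x :=
            le_antisymm (not_lt.mp hlM) hxM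
          rw [hM, List.idxOf_cons_self]
          simp
      · have := foldl_add_shift (t.map PySem.Str.len) (PySem.Str.len x) 0
        rw [zero_add]
        rw [show PySem.Str.len x + 0 = PySem.Str.len x by ring] at this
        rw [this]
        ring
    · rw [if_neg h, ih (s + 1) ml mi (al + PySem.Str.len x)]
      have hle : PySem.Str.len x ≤ ml := not_lt.mp h
      rw [max_eq_left hle]
      simp only [Prod.mk.injEq]
      refine ⟨trivial, ?_, ?_⟩
      · by_cases hm : ml < (t.map PySem.Str.len).foldl max ml
        · rw [if_pos hm, if_pos hm]
          have hne : PySem.Str.len x ≠ (t.map PySem.Str.len).foldl max ml :=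
            ne_of_lt (lt_of_le_of_lt hle hm)
          rw [List.idxOf_cons_ne _ hne]
          push_cast
          ring
        · rw [if_neg hm, if_neg hm]
      · have := foldl_add_shift (t.map PySem.Str.len) (PySem.Str.len x) 0
        rw [zero_add]
        rw [show PySem.Str.len x + 0 = PySem.Str.len x by ring] at this
        rw [this]
        ring

-- ===== VERDICT (by name: the statement is the Claim_ definition above) =====
theorem find_longest_du_spec : Claim_equal_find_longest_du := by
  intro dus _hdom
  unfold Spec_find_longest_du
  cases dus with
  | nil => decide
  | cons x t =>
    dsimp only [find_longest_du, find_longest_du_alt]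
    rw [loopA_eq (x :: t) 0 0 (-1) 0]
    have h0 : (0 : Int) ≤ PySem.Str.len x := by simp [PySem.Str.len_eq]
    simp only [List.map_cons, List.foldl_cons, List.isEmpty_cons,
      Bool.false_eq_true, if_false]
    rw [PySem.List.max?_id_cons, Option.getD_some, max_eq_right h0]
    have hmem : (List.map PySem.Str.len t).foldl max (PySem.Str.len x)
        ∈ PySem.Str.len x :: List.map PySem.Str.len t :=
      PySem.List.max?_mem (PySem.List.max?_id_cons (PySem.Str.len x) (List.map PySem.Str.len t))
    by_cases hp : (0 : Int) < (List.map PySem.Str.len t).foldl max (PySem.Str.len x)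
    · rw [if_pos hp, if_pos hp, index?_getD_eq_idxOf _ _ hmem]
      simp
    · rw [if_neg hp, if_neg hp]
      simp
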